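-- pv_equiv track=rewrite | github.com/do0134/solostudy | algorithm/2023/12월/1227/1sol.py | solve
-- ===== SOURCE A (Python) =====
-- def solve(prime_number, n):
--     if n % 2:
--         n -= 5
--         answer = [2,3]
--     else:
--         n -= 4
--         answer = [2,2]
--     L = len(prime_number)
--     l = 0
--     r = L -1
--     v = list()
--
--     while l <= r:
--         if prime_number[l]+prime_number[r] > n:
--             r -= 1
--         elif prime_number[l]+prime_number[r] < n:
--             l += 1
--         else:
--             v = [prime_number[l],prime_number[r]]
--             answer += v
--             return answer
--     if not v:
--         return [-1]
--     else:
--         return answer + v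
-- ===== SOURCE B (Python) =====
-- def _find_pair(target, window):
--     # shrink the window from either end until the ends sum to target
--     while window:
--         lo, hi = window[0], window[-1]
--         if lo + hi > target:
--             window.pop()
--         elif lo + hi < target:
--             window.pop(0)
--         else:
--             return (lo, hi)
--     return None
--
--
-- def solve(prime_number, n):
--     if n % 2:
--         target, answer = n - 5, [2, 3]
--     else:
--         target, answer = n - 4, [2, 2]
--     pair = _find_pair(target, list(prime_number))
--     if pair is None:
--         return [-1]
--     return answer + [pair[0], pair[1]]
-- ===== Notes on version B (the rewrite author's own statement) =====
-- stated objective: alternative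
-- what changed: The search is factored into a helper that maintains a shrinking window list (popping from either end) and returns the found pair or None, instead of A's single loop over two integer indices with a leftover-state check ('if not v') after the loop; the hinted set-membership scan was not usable because it only matches A on sorted inputs.
import Mathlib
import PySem

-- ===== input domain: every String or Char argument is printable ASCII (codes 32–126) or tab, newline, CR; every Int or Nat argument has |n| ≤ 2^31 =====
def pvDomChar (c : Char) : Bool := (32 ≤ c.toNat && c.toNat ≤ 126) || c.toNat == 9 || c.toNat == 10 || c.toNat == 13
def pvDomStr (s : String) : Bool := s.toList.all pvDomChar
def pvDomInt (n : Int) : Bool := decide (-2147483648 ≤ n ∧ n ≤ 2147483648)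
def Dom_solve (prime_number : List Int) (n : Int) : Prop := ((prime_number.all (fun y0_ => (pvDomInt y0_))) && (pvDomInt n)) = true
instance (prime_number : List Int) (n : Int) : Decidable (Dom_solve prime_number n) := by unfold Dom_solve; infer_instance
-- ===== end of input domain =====

-- B refactors A's two-index loop into a helper over a shrinking window list returning an optional pair; return values proved equal on all inputs (A never raises).

-- ===== PORT A =====
-- A's while loop over the two indices l, r; indices are always in range while l ≤ r,
-- so pyGetD's default 0 is never used.  After the loop v is always [], so A returns [-1].
def solveLoopA (xs : List Int) (t : Int) (answer : List Int) (l r : Int) : List Int :=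
  if _h : l ≤ r then
    if PySem.List.pyGetD xs l 0 + PySem.List.pyGetD xs r 0 > t then
      solveLoopA xs t answer l (r - 1)
    else if PySem.List.pyGetD xs l 0 + PySem.List.pyGetD xs r 0 < t then
      solveLoopA xs t answer (l + 1) r
    else
      answer ++ [PySem.List.pyGetD xs l 0, PySem.List.pyGetD xs r 0]
  else [-1]
termination_by (r - l + 1).toNat
decreasing_by all_goals omega

def solve (prime_number : List Int) (n : Int) : List Int :=
  if PySem.Int.mod n 2 ≠ 0 then
    solveLoopA prime_number (n - 5) [2, 3] 0 ((prime_number.length : Int) - 1)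
  else
    solveLoopA prime_number (n - 4) [2, 2] 0 ((prime_number.length : Int) - 1)

-- ===== PORT B =====
-- helper _find_pair of Source B: pop from either end of the window until the ends sum to target
def findPair (t : Int) (window : List Int) : Option (Int × Int) :=
  match window with
  | [] => none
  | x :: rest =>
    let y := (x :: rest).getLast (by simp)
    if x + y > t then findPair t (x :: rest).dropLast
    else if x + y < t then findPair t rest
    else some (x, y)
termination_by window.length
decreasing_by all_goals simp

def solve_alt (prime_number : List Int) (n : Int) : List Int :=
  let p := if PySem.Int.mod n 2 ≠ 0 then (n - 5, ([2, 3] : List Int)) else (n - 4, ([2, 2] : List Int))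
  match findPair p.1 prime_number with
  | some (a, b) => p.2 ++ [a, b]
  | none => [-1]

-- ===== PRECONDITION & SPEC =====
def Spec_solve (prime_number : List Int) (n : Int) (out : List Int) : Prop := out = solve_alt prime_number n
instance (prime_number : List Int) (n : Int) (out : List Int) : Decidable (Spec_solve prime_number n out) := by unfold Spec_solve; infer_instance

-- ===== CLAIM (what is proved, stated in full; the proofs are below) =====
def Claim_equal_solve : Prop := ∀ (prime_number : List Int) (n : Int), Dom_solve prime_number n → Spec_solve prime_number n (solve prime_number n)

-- ===== LEMMAS AND PROOFS =====

lemma drop_take_dropLast {α : Type} (xs : List α) (a b : Nat) (hb : b ≤ xs.length) :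
    ((xs.take b).drop a).dropLast = (xs.take (b - 1)).drop a := by
  apply List.ext_getElem?
  intro i
  simp only [List.getElem?_drop, List.getElem?_dropLast, List.getElem?_take,
    List.length_drop, List.length_take, Nat.min_def]
  split_ifs <;> first | rfl | omega

-- window invariant: A's loop at (l, r) computes what findPair computes on xs[l..r]
lemma loop_eq (xs : List Int) (t : Int) (ans : List Int) :
    ∀ (k : Nat) (l r : Int), 0 ≤ l → r < (xs.length : Int) → k = (r - l + 1).toNat →
      solveLoopA xs t ans l r =
        (match findPair t ((xs.take (r + 1).toNat).drop l.toNat) with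
         | some (a, b) => ans ++ [a, b]
         | none => [-1]) := by
  intro k
  induction k with
  | zero =>
    intro l r hl hr hk
    rw [solveLoopA, dif_neg (by omega : ¬ l ≤ r)]
    have hwin : (xs.take (r + 1).toNat).drop l.toNat = [] := by
      rw [← List.length_eq_zero_iff]
      simp only [List.length_drop, List.length_take, Nat.min_def]
      split_ifs <;> omega
    rw [hwin]
    simp [findPair]
  | succ k ih =>
    intro l r hl hr hk
    have hlr : l ≤ r := by omega
    have hlen : l.toNat < xs.length := by omega
    have hrlen : r.toNat < xs.length := by omega
    set win := (xs.take (r + 1).toNat).drop l.toNat with hwin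
    have hwlen : win.length = (r + 1).toNat - l.toNat := by
      simp only [hwin, List.length_drop, List.length_take, Nat.min_def]
      split_ifs <;> omega
    obtain ⟨x, rest, hxr⟩ := List.exists_cons_of_ne_nil
      (by intro h; rw [h] at hwlen; simp at hwlen; omega : win ≠ [])
    -- head of the window is xs[l]
    have hx : x = xs[l.toNat] := by
      have h1 : win[0]? = some x := by rw [hxr]; rfl
      rw [hwin, List.getElem?_drop, List.getElem?_take, if_pos (by omega)] at h1
      have h2 : xs[l.toNat + 0]? = some xs[l.toNat] := by
        simp [List.getElem?_eq_getElem hlen]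
      rw [h2] at h1
      exact (Option.some_inj.mp h1).symm
    -- last element of the window is xs[r]
    have hy : (x :: rest).getLast (by simp) = xs[r.toNat] := by
      have h1 : win.getLast? = some ((x :: rest).getLast (by simp)) := by
        rw [hxr]; exact List.getLast?_eq_some_getLast _
      rw [List.getLast?_eq_getElem?, hwlen, hwin, List.getElem?_drop, List.getElem?_take] at h1
      rw [if_pos (by omega)] at h1
      have hidx : l.toNat + ((r + 1).toNat - l.toNat - 1) = r.toNat := by omega
      rw [hidx] at h1
      have h2 : xs[r.toNat]? = some xs[r.toNat] := by
        simp [List.getElem?_eq_getElem hrlen]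
      rw [h2] at h1
      exact (Option.some_inj.mp h1).symm
    have hgl : PySem.List.pyGetD xs l 0 = xs[l.toNat] :=
      PySem.List.pyGetD_eq_getElem xs 0 hl (by exact_mod_cast hr.trans_le' hlr)
    have hgr : PySem.List.pyGetD xs r 0 = xs[r.toNat] :=
      PySem.List.pyGetD_eq_getElem xs 0 (by omega) (by exact_mod_cast hr)
    rw [solveLoopA, dif_pos hlr, hgl, hgr, hxr]
    rw [findPair]
    simp only [hy]
    subst hx
    split_ifs with hgt hlt
    · -- sum > t : pop the right end
      rw [ih l (r - 1) hl (by omega) (by omega)]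
      have hdl : (xs[l.toNat] :: rest).dropLast = (xs.take (r - 1 + 1).toNat).drop l.toNat := by
        rw [← hxr, hwin, drop_take_dropLast _ _ _ (by omega)]
        congr 2
        omega
      rw [hdl]
    · -- sum < t : pop the left end
      rw [ih (l + 1) r (by omega) hr (by omega)]
      have htl : rest = (xs.take (r + 1).toNat).drop (l + 1).toNat := by
        have h3 : rest = win.tail := by rw [hxr]; rfl
        rw [h3, hwin, List.tail_drop]
        congr 1
        omega
      rw [htl]
    · rfl

-- ===== VERDICT (by name: the statement is the Claim_ definition above) =====
theorem solve_spec : Claim_equal_solve := by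
  intro xs n _
  unfold Spec_solve solve solve_alt
  have key : ∀ t ans, solveLoopA xs t ans 0 ((xs.length : Int) - 1) =
      (match findPair t xs with
       | some (a, b) => ans ++ [a, b]
       | none => [-1]) := by
    intro t ans
    rw [loop_eq xs t ans ((xs.length : Int) - 0 - 1 + 1).toNat 0 ((xs.length : Int) - 1)
      le_rfl (by omega) (by omega)]
    have hw : (xs.take ((xs.length : Int) - 1 + 1).toNat).drop (0 : Int).toNat = xs := by
      simp only [Int.toNat_zero, List.drop_zero]
      have : ((xs.length : Int) - 1 + 1).toNat = xs.length := by omega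
      rw [this, List.take_length]
    rw [hw]
  by_cases hpar : PySem.Int.mod n 2 ≠ 0
  · rw [if_pos hpar, if_pos hpar, key]
  · rw [if_neg hpar, if_neg hpar, key]
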